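-- pv_equiv track=rewrite | github.com/eronekogin/leetcode | Accepted/longest_word_in_dictionary_through_deleting.py | findLongestWord2
-- ===== SOURCE A (Python) =====
-- from typing import List
--
-- def findLongestWord2(s: str, d: List[str]) -> str:
--     """
--     Without sorting.
--     """
--     rslt = ''
--     for t in d:
--         iterS = iter(s)
--         if all(c in iterS for c in t) and (
--                 len(t) > len(rslt) or (len(t) == len(rslt) and t < rslt)):
--             rslt = t
--
--     return rslt
-- ===== SOURCE B (Python) =====
-- def findLongestWord2(s, d):
--     def is_subseq(t):
--         i = 0
--         for ch in s:
--             if i < len(t) and t[i] == ch: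
--                 i += 1
--         return i == len(t)
--
--     for w in sorted(d, key=lambda w: (-len(w), w)):
--         if is_subseq(w):
--             return w
--     return ''
-- ===== Notes on version B (the rewrite author's own statement) =====
-- stated objective: idiomatic
-- what changed: Replaced A's scan with a running-best variable and composite length/lex comparison by sorting a copy of d with key (-len(w), w) and returning the first word that is a subsequence of s (two-pointer check), '' if none.
import Mathlib
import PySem

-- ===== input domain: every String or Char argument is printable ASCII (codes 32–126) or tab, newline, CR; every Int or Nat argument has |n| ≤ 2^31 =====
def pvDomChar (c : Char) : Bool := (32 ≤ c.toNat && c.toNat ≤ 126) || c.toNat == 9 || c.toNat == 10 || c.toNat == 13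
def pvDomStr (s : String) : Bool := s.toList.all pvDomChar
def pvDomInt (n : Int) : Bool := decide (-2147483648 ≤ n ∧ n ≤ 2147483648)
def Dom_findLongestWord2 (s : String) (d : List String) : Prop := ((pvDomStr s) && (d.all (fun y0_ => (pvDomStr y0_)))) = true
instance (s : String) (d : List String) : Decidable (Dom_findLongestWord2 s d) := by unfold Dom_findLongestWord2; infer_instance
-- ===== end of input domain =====

-- B replaces A's scan-with-running-best (composite length/lex comparison) by sorting a
-- copy of d with key (-len(w), w) and returning the first word that is a subsequence of
-- s (two-pointer check); objective: idiomatic. Both are total; d is not mutated.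

-- ===== PORT A =====
-- `all(c in iterS for c in t)` on a fresh iterator of s: greedy subsequence matching,
-- consuming s left to right (exact port of the iterator semantics).
def pvAllInIter : List Char → List Char → Bool
  | [], _ => true
  | _ :: _, [] => false
  | c :: t, x :: rest => if c = x then pvAllInIter t rest else pvAllInIter (c :: t) rest

def findLongestWord2 (s : String) (d : List String) : String :=
  d.foldl (fun rslt t =>
    if pvAllInIter t.toList s.toList
        && (decide (PySem.Str.len rslt < PySem.Str.len t)
            || (PySem.Str.len t == PySem.Str.len rslt && decide (t < rslt)))
    then t else rslt) ""

-- ===== PORT B =====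
-- Source B's is_subseq: pointer i into t, advanced while scanning the characters of s.
def pvIsSubseq (s t : List Char) : Bool :=
  (s.foldl (fun i ch => if decide (i < t.length) && (t[i]? == some ch) then i + 1 else i)
    (0 : Nat)) == t.length

-- Source B's sort key (-len(w), w): Python tuple comparison is the lexicographic order.
def pvKey (w : String) : Lex (Int × String) := toLex (-(PySem.Str.len w), w)

-- Source B's `for w in sorted(...): if is_subseq(w): return w` / `return ''`.
def pvFirstMatch (s : List Char) : List String → String
  | [] => ""
  | w :: rest => if pvIsSubseq s w.toList then w else pvFirstMatch s rest

def findLongestWord2_alt (s : String) (d : List String) : String :=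
  pvFirstMatch s.toList (PySem.List.sorted d pvKey)

-- ===== PRECONDITION & SPEC =====
def Spec_findLongestWord2 (s : String) (d : List String) (out : String) : Prop := out = findLongestWord2_alt s d
instance (s : String) (d : List String) (out : String) : Decidable (Spec_findLongestWord2 s d out) := by unfold Spec_findLongestWord2; infer_instance

-- ===== CLAIM (what is proved, stated in full; the proofs are below) =====
def Claim_equal_findLongestWord2 : Prop := ∀ (s : String) (d : List String), Dom_findLongestWord2 s d → Spec_findLongestWord2 s d (findLongestWord2 s d)

-- ===== LEMMAS AND PROOFS =====

lemma pvKey_inj {a b : String} (h : pvKey a = pvKey b) : a = b := by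
  unfold pvKey at h
  have := congrArg (fun p => (ofLex p).2) h
  simpa using this

lemma pvKey_lt_iff (t r : String) :
    pvKey t < pvKey r ↔
      (PySem.Str.len r < PySem.Str.len t ∨
        (PySem.Str.len t = PySem.Str.len r ∧ t < r)) := by
  unfold pvKey
  rw [Prod.Lex.toLex_lt_toLex]
  constructor
  · rintro (h | ⟨h1, h2⟩)
    · exact Or.inl (by omega)
    · exact Or.inr ⟨by omega, h2⟩
  · rintro (h | ⟨h1, h2⟩)
    · exact Or.inl (by omega)
    · exact Or.inr ⟨by omega, h2⟩

lemma pvKey_le_empty (w : String) : pvKey w ≤ pvKey "" := by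
  by_cases hw : w = ""
  · subst hw; exact le_refl _
  · have hpos : 0 < w.toList.length := by
      rcases Nat.eq_zero_or_pos w.toList.length with h | h
      · exact absurd (by simpa using (List.length_eq_zero_iff.mp h)) hw
      · exact h
    have h0 : PySem.Str.len "" = 0 := by decide
    unfold pvKey
    rw [Prod.Lex.toLex_le_toLex]
    left
    rw [h0, PySem.Str.len_eq]
    omega

-- A's update step, propositionally (M is the subsequence test against s, fixed).
def pvStep (M : String → Bool) (r t : String) : String :=
  if M t = true ∧ pvKey t < pvKey r then t else r

lemma pvStep_eq_fold (s : String) :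
    (fun rslt t =>
      if pvAllInIter t.toList s.toList
          && (decide (PySem.Str.len rslt < PySem.Str.len t)
              || (PySem.Str.len t == PySem.Str.len rslt && decide (t < rslt)))
      then t else rslt)
    = fun r t => pvStep (fun u => pvAllInIter u.toList s.toList) r t := by
  funext r t
  by_cases hM : pvAllInIter t.toList s.toList = true <;>
    by_cases h1 : PySem.Str.len r < PySem.Str.len t <;>
      by_cases h2 : PySem.Str.len t = PySem.Str.len r <;>
        by_cases h3 : t < r <;>
          simp [pvStep, pvKey_lt_iff, hM, h1, h2, h3]

lemma pvStep_comm (M : String → Bool) (r a b : String) :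
    pvStep M (pvStep M r a) b = pvStep M (pvStep M r b) a := by
  by_cases hMa : M a = true
  · by_cases hMb : M b = true
    · by_cases h1 : pvKey a < pvKey r
      · by_cases h2 : pvKey b < pvKey r
        · rcases lt_trichotomy (pvKey a) (pvKey b) with hab | hab | hab
          · have hba : ¬ pvKey b < pvKey a := not_lt.mpr hab.le
            simp [pvStep, hMa, hMb, h1, h2, hab, hba]
          · have hab' : a = b := pvKey_inj hab
            subst hab'; rfl
          · have hab' : ¬ pvKey a < pvKey b := not_lt.mpr hab.le
            simp [pvStep, hMa, hMb, h1, h2, hab, hab']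
        · have hba : ¬ pvKey b < pvKey a := fun hh => h2 (lt_trans hh h1)
          simp [pvStep, hMa, hMb, h1, h2, hba]
      · by_cases h2 : pvKey b < pvKey r
        · have hab : ¬ pvKey a < pvKey b := fun hh => h1 (lt_trans hh h2)
          simp [pvStep, hMa, hMb, h1, h2, hab]
        · simp [pvStep, hMa, hMb, h1, h2]
    · simp [pvStep, hMb]
  · simp [pvStep, hMa]

lemma pvFold_no_update (M : String → Bool) (l : List String) (r : String)
    (h : ∀ w ∈ l, ¬ pvKey w < pvKey r) :
    l.foldl (fun r t => pvStep M r t) r = r := by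
  induction l with
  | nil => rfl
  | cons w l ih =>
      have hw : pvStep M r w = r := by
        unfold pvStep
        rw [if_neg (fun hh => h w (by simp) hh.2)]
      simp only [List.foldl_cons, hw]
      exact ih (fun x hx => h x (by simp [hx]))

lemma pvAllInIter_nil (s : List Char) : pvAllInIter [] s = true := by
  cases s <;> rfl

lemma pvAllInIter_cons_cons (c : Char) (t : List Char) (x : Char) (rest : List Char) :
    pvAllInIter (c :: t) (x :: rest)
      = if c = x then pvAllInIter t rest else pvAllInIter (c :: t) rest := rfl

-- B's two-pointer fold computes exactly A's greedy iterator match.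
lemma pvFoldPointer_eq (t : List Char) :
    ∀ (s : List Char) (i : Nat), i ≤ t.length →
    ((List.foldl (fun i ch => if decide (i < t.length) && (t[i]? == some ch) then i + 1 else i) i s)
        == t.length) = pvAllInIter (List.drop i t) s := by
  intro s
  induction s with
  | nil =>
      intro i hi
      rcases Nat.lt_or_ge i t.length with h | h
      · have hd : List.drop i t = t[i] :: List.drop (i + 1) t := List.drop_eq_getElem_cons h
        rw [List.foldl_nil, hd]
        have : pvAllInIter (t[i] :: List.drop (i + 1) t) [] = false := rfl
        rw [this]
        simp
        omega
      · have hi' : i = t.length := by omega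
        subst hi'
        rw [List.foldl_nil, List.drop_length, pvAllInIter_nil]
        simp
  | cons x s ih =>
      intro i hi
      rcases Nat.lt_or_ge i t.length with h | h
      · have hd : List.drop i t = t[i] :: List.drop (i + 1) t := List.drop_eq_getElem_cons h
        have hget : t[i]? = some t[i] := List.getElem?_eq_getElem h
        by_cases hc : t[i] = x
        · have hcond : (decide (i < t.length) && (t[i]? == some x)) = true := by
            simp [h, hc]
          rw [List.foldl_cons, if_pos hcond, ih (i + 1) (by omega), hd,
            pvAllInIter_cons_cons, if_pos hc]
        · have hcond : (decide (i < t.length) && (t[i]? == some x)) = false := by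
            simp [hget, hc]
          rw [List.foldl_cons, if_neg (by simp [hcond]), ih i hi, hd,
            pvAllInIter_cons_cons, if_neg hc, ← hd]
      · have hi' : i = t.length := by omega
        subst hi'
        rw [List.foldl_cons, if_neg (by simp), ih t.length le_rfl,
          List.drop_length, pvAllInIter_nil, pvAllInIter_nil]

lemma pvIsSubseq_eq (s t : List Char) : pvIsSubseq s t = pvAllInIter t s := by
  unfold pvIsSubseq
  simpa using pvFoldPointer_eq t s 0 (Nat.zero_le _)

-- Over a key-sorted list, A's running-best fold returns the first matching word.
lemma pvMain (s : List Char) :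
    ∀ (l : List String), l.Pairwise (fun a b => pvKey a ≤ pvKey b) →
    l.foldl (fun r t => pvStep (fun u => pvAllInIter u.toList s) r t) "" = pvFirstMatch s l := by
  intro l
  induction l with
  | nil => intro _; rfl
  | cons w l ih =>
      intro hp
      have hw : ∀ x ∈ l, pvKey w ≤ pvKey x := (List.pairwise_cons.mp hp).1
      have htl : l.Pairwise (fun a b => pvKey a ≤ pvKey b) := (List.pairwise_cons.mp hp).2
      unfold pvFirstMatch
      rw [pvIsSubseq_eq]
      by_cases hM : pvAllInIter w.toList s = true
      · rw [if_pos hM]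
        by_cases hlt : pvKey w < pvKey ""
        · have hstep : pvStep (fun u => pvAllInIter u.toList s) "" w = w := by
            unfold pvStep; rw [if_pos ⟨hM, hlt⟩]
          simp only [List.foldl_cons, hstep]
          exact pvFold_no_update _ l w (fun x hx => not_lt.mpr (hw x hx))
        · have heq : pvKey w = pvKey "" :=
            le_antisymm (pvKey_le_empty w) (not_lt.mp hlt)
          have hw0 : w = "" := pvKey_inj heq
          have hstep : pvStep (fun u => pvAllInIter u.toList s) "" w = "" := by
            unfold pvStep; rw [if_neg (fun hh => hlt hh.2)]
          simp only [List.foldl_cons, hstep]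
          rw [pvFold_no_update _ l "" (fun x hx => by
            have := hw x hx
            rw [hw0] at this
            exact not_lt.mpr this)]
          exact hw0.symm
      · rw [if_neg hM]
        have hstep : pvStep (fun u => pvAllInIter u.toList s) "" w = "" := by
          unfold pvStep; rw [if_neg (fun hh => hM hh.1)]
        simp only [List.foldl_cons, hstep]
        exact ih htl

-- ===== VERDICT (by name: the statement is the Claim_ definition above) =====
theorem findLongestWord2_spec : Claim_equal_findLongestWord2 := by
  intro s d _
  unfold Spec_findLongestWord2 findLongestWord2 findLongestWord2_alt
  rw [pvStep_eq_fold s]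
  rw [List.Perm.foldl_eq' (PySem.List.sorted_perm d pvKey false).symm
    (fun x _ y _ z => pvStep_comm _ z x y) ""]
  exact pvMain s.toList _ (PySem.List.sorted_pairwise d pvKey)
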